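-- pv_equiv track=rewrite | github.com/copperdogma/doc-web | modules/portionize/detect_boundaries_code_first_v1/main.py | _pick_anchor_by_position
-- ===== SOURCE A (Python) =====
-- from typing import Dict, List, Set, Optional, Any, Tuple
--
-- def _pick_anchor_by_position(anchor_ids: List[str], id_to_seq: Dict[str, int], position: Optional[str]) -> Optional[str]:
--     if not anchor_ids:
--         return None
--     if not position:
--         return anchor_ids[0]
--     seq_pairs = [(aid, id_to_seq.get(aid, 999999)) for aid in anchor_ids]
--     seq_pairs.sort(key=lambda x: x[1])
--     position = position.lower()
--     if position == "top":
--         return seq_pairs[0][0]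
--     if position == "bottom":
--         return seq_pairs[-1][0]
--     if position == "middle":
--         return seq_pairs[len(seq_pairs) // 2][0]
--     return seq_pairs[0][0]
-- ===== SOURCE B (Python) =====
-- from typing import Dict, List, Optional
--
--
-- def _pick_anchor_by_position(anchor_ids: List[str], id_to_seq: Dict[str, int], position: Optional[str]) -> Optional[str]:
--     if not anchor_ids:
--         return None
--     if not position:
--         return anchor_ids[0]
--     pos = position.lower()
--     if pos == "middle":
--         pairs = sorted([(a, id_to_seq.get(a, 999999)) for a in anchor_ids], key=lambda p: p[1])
--         return pairs[len(pairs) // 2][0]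
--     best, best_seq = anchor_ids[0], id_to_seq.get(anchor_ids[0], 999999)
--     if pos == "bottom":
--         for a in anchor_ids[1:]:
--             s = id_to_seq.get(a, 999999)
--             if s >= best_seq:  # last on ties, like stable sort's final element
--                 best, best_seq = a, s
--     else:  # "top" and the unknown-position fallback
--         for a in anchor_ids[1:]:
--             s = id_to_seq.get(a, 999999)
--             if s < best_seq:  # first on ties, like stable sort's first element
--                 best, best_seq = a, s
--     return best
-- ===== Notes on version B (the rewrite author's own statement) =====
-- stated objective: alternative
-- what changed: Replaces the unconditional build-and-stable-sort of the pair list by a branch on the lowercased position: 'top' and the unknown-position fallback do a single linear scan keeping the first minimum, 'bottom' a single linear scan keeping the last maximum; only 'middle' still sorts.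
import Mathlib
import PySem

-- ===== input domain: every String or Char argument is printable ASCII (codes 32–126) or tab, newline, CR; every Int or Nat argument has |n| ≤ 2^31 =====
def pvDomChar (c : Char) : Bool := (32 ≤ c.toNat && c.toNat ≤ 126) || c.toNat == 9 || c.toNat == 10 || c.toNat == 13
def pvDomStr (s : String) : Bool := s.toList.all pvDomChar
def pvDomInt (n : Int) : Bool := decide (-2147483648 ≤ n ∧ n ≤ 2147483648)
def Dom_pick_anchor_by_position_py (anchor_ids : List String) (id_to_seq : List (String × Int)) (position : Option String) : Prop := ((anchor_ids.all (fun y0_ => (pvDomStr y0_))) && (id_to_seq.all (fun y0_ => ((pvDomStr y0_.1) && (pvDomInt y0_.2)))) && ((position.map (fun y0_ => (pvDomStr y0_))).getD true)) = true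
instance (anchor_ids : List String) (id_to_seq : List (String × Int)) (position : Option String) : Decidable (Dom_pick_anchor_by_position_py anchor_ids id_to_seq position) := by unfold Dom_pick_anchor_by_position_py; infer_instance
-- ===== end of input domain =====

-- B branches on the lowercased position: single linear scans for 'top'/'bottom'
-- (and the unknown-position fallback) and only sorts for 'middle' (objective: alternative).


-- ===== PORT A =====
-- literal transliteration of A: always build the pair list, stable-sort it by seq,
-- then index it (0 for "top"/fallback, -1 for "bottom", len//2 for "middle")
def pick_anchor_by_position_py (anchor_ids : List String) (id_to_seq : List (String × Int)) (position : Option String) : Option String :=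
  if anchor_ids = [] then none
  else if position.getD "" = "" then some (PySem.List.pyGetD anchor_ids 0 "")
  else
    let seq_pairs := anchor_ids.map (fun aid => (aid, PySem.Dict.getD (PySem.Dict.mk id_to_seq) aid 999999))
    let sp := PySem.List.sorted seq_pairs (fun x => x.2) false
    let pos := PySem.Str.lower (position.getD "")
    if pos = "top" then some (PySem.List.pyGetD sp 0 ("", 0)).1
    else if pos = "bottom" then some (PySem.List.pyGetD sp (-1) ("", 0)).1
    else if pos = "middle" then some (PySem.List.pyGetD sp (PySem.Int.floordiv (sp.length : Int) 2) ("", 0)).1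
    else some (PySem.List.pyGetD sp 0 ("", 0)).1

-- ===== PORT B =====
-- transliteration of Source B: branch on pos first; sort only for "middle";
-- otherwise one foldl over the tail keeping (best, best_seq)
def pick_anchor_by_position_py_alt (anchor_ids : List String) (id_to_seq : List (String × Int)) (position : Option String) : Option String :=
  match anchor_ids with
  | [] => none
  | a0 :: rest =>
    if position.getD "" = "" then some a0
    else
      let pos := PySem.Str.lower (position.getD "")
      if pos = "middle" then
        let pairs := PySem.List.sorted (anchor_ids.map (fun a => (a, PySem.Dict.getD (PySem.Dict.mk id_to_seq) a 999999))) (fun p => p.2) false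
        some (PySem.List.pyGetD pairs (PySem.Int.floordiv (pairs.length : Int) 2) ("", 0)).1
      else
        let seed : String × Int := (a0, PySem.Dict.getD (PySem.Dict.mk id_to_seq) a0 999999)
        if pos = "bottom" then
          some (rest.foldl (fun b a =>
            let s := PySem.Dict.getD (PySem.Dict.mk id_to_seq) a 999999
            if s ≥ b.2 then (a, s) else b) seed).1
        else
          some (rest.foldl (fun b a =>
            let s := PySem.Dict.getD (PySem.Dict.mk id_to_seq) a 999999
            if s < b.2 then (a, s) else b) seed).1

-- ===== PRECONDITION & SPEC =====
def Spec_pick_anchor_by_position_py (anchor_ids : List String) (id_to_seq : List (String × Int)) (position : Option String) (out : Option String) : Prop := out = pick_anchor_by_position_py_alt anchor_ids id_to_seq position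
instance (anchor_ids : List String) (id_to_seq : List (String × Int)) (position : Option String) (out : Option String) : Decidable (Spec_pick_anchor_by_position_py anchor_ids id_to_seq position out) := by unfold Spec_pick_anchor_by_position_py; infer_instance

-- ===== CLAIM (what is proved, stated in full; the proofs are below) =====
def Claim_equal_pick_anchor_by_position_py : Prop := ∀ (anchor_ids : List String) (id_to_seq : List (String × Int)) (position : Option String), Dom_pick_anchor_by_position_py anchor_ids id_to_seq position → Spec_pick_anchor_by_position_py anchor_ids id_to_seq position (pick_anchor_by_position_py anchor_ids id_to_seq position)

-- ===== LEMMAS AND PROOFS =====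

-- the comparison the stable insertion sort (key = .2, reverse = false) uses
def pvBf : (String × Int) → (String × Int) → Bool := fun a b => decide (a.2 < b.2)

theorem pvIns_nil (x : String × Int) : PySem.List.insertBy pvBf x [] = [x] := rfl

theorem pvIns_cons (x y : String × Int) (ys : List (String × Int)) :
    PySem.List.insertBy pvBf x (y :: ys) =
      if x.2 < y.2 then x :: y :: ys else y :: PySem.List.insertBy pvBf x ys := by
  simp [PySem.List.insertBy, pvBf]

-- head of the insertion-sort fold = single scan keeping the FIRST minimum
theorem pvHead_foldl_ins (xs : List (String × Int)) :
    ∀ (b : String × Int) (acc : List (String × Int)),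
      (xs.foldl (fun acc x => PySem.List.insertBy pvBf x acc) (b :: acc)).head? =
        some (xs.foldl (fun m x => if x.2 < m.2 then x else m) b) := by
  induction xs with
  | nil => intro b acc; rfl
  | cons x xs ih =>
    intro b acc
    simp only [List.foldl_cons, pvIns_cons]
    by_cases h : x.2 < b.2
    · simp [h, ih]
    · simp [h, ih]

-- the two branches of a min/max step are mirror images of each other
theorem pvFlip (m x : String × Int) :
    (if m.2 ≤ x.2 then x else m) = (if x.2 < m.2 then m else x) := by
  by_cases h : x.2 < m.2
  · simp [h, not_le.2 h]
  · simp [h, le_of_not_gt h]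

-- last of insertBy into a list whose last element has maximal key
theorem pvIns_last (x : String × Int) :
    ∀ (l : List (String × Int)) (b : String × Int), l.getLast? = some b →
      (∀ y ∈ l, y.2 ≤ b.2) →
      (PySem.List.insertBy pvBf x l).getLast? = some (if x.2 < b.2 then b else x) := by
  intro l
  induction l with
  | nil => intro b h; simp at h
  | cons y ys ih =>
    intro b hlast hinv
    cases ys with
    | nil =>
      simp at hlast; subst hlast
      rw [pvIns_cons]
      by_cases h : x.2 < y.2 <;> simp [h, pvIns_nil]
    | cons z zs =>
      rw [List.getLast?_cons_cons] at hlast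
      rw [pvIns_cons]
      by_cases h : x.2 < y.2
      · have hy : y.2 ≤ b.2 := hinv y (by simp)
        have : x.2 < b.2 := lt_of_lt_of_le h hy
        simp [h, List.getLast?_cons_cons, hlast, this]
      · have htail := ih b hlast (fun w hw => hinv w (by simp [hw]))
        simp only [h, if_false]
        have hne : PySem.List.insertBy pvBf x (z :: zs) ≠ [] := by
          rw [pvIns_cons]
          by_cases h2 : x.2 < z.2 <;> simp [h2]
        cases hcase : PySem.List.insertBy pvBf x (z :: zs) with
        | nil => exact absurd hcase hne
        | cons w ws =>
          rw [hcase] at htail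
          simp [List.getLast?_cons_cons, htail]

-- last of the insertion-sort fold = single scan keeping the LAST maximum
theorem pvLast_foldl_ins (xs : List (String × Int)) :
    ∀ (l : List (String × Int)) (b : String × Int), l.getLast? = some b →
      (∀ y ∈ l, y.2 ≤ b.2) →
      (xs.foldl (fun acc x => PySem.List.insertBy pvBf x acc) l).getLast? =
        some (xs.foldl (fun m x => if x.2 < m.2 then m else x) b) := by
  induction xs with
  | nil => intro l b hlast _; simpa using hlast
  | cons x xs ih =>
    intro l b hlast hinv
    simp only [List.foldl_cons]
    have hb' : ∀ y ∈ PySem.List.insertBy pvBf x l, y.2 ≤ (if x.2 < b.2 then b else x).2 := by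
      intro y hy
      rcases (PySem.List.mem_insertBy pvBf x y l).1 hy with rfl | hy'
      · split_ifs with h
        · exact le_of_lt h
        · exact le_refl _
      · split_ifs with h
        · exact hinv y hy'
        · exact le_trans (hinv y hy') (le_of_not_gt h)
    exact ih _ _ (pvIns_last x l b hlast hinv) hb'

-- sorted of a nonempty list as a fold starting from the singleton
theorem pvSorted_cons (p : String × Int) (ps : List (String × Int)) :
    PySem.List.sorted (p :: ps) (fun x => x.2) false =
      ps.foldl (fun acc x => PySem.List.insertBy pvBf x acc) [p] := rfl

theorem pvSorted_head (p : String × Int) (ps : List (String × Int)) :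
    (PySem.List.sorted (p :: ps) (fun x => x.2) false).head? =
      some (ps.foldl (fun m x => if x.2 < m.2 then x else m) p) := by
  rw [pvSorted_cons]; exact pvHead_foldl_ins ps p []

theorem pvSorted_last (p : String × Int) (ps : List (String × Int)) :
    (PySem.List.sorted (p :: ps) (fun x => x.2) false).getLast? =
      some (ps.foldl (fun m x => if x.2 < m.2 then m else x) p) := by
  rw [pvSorted_cons]
  exact pvLast_foldl_ins ps [p] p (by simp) (by simp)

-- ===== VERDICT (by name: the statement is the Claim_ definition above) =====
theorem pick_anchor_by_position_py_spec : Claim_equal_pick_anchor_by_position_py := by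
  intro anchor_ids id_to_seq position _
  unfold Spec_pick_anchor_by_position_py pick_anchor_by_position_py pick_anchor_by_position_py_alt
  cases anchor_ids with
  | nil => simp
  | cons a0 rest =>
    simp only [if_false, reduceCtorEq]
    by_cases hfalsy : position.getD "" = ""
    · simp [hfalsy, PySem.List.pyGetD_zero_cons]
    · simp only [hfalsy, if_false]
      set pos := PySem.Str.lower (position.getD "") with hpos
      set f : String → String × Int := fun a => (a, PySem.Dict.getD (PySem.Dict.mk id_to_seq) a 999999) with hf
      have hmap : (a0 :: rest).map f = f a0 :: rest.map f := rfl
      set sp := PySem.List.sorted ((a0 :: rest).map f) (fun x => x.2) false with hsp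
      -- B's two scans, rewritten as folds over the mapped pair list
      have hmin : rest.foldl (fun b a =>
            if PySem.Dict.getD (PySem.Dict.mk id_to_seq) a 999999 < b.2
            then (a, PySem.Dict.getD (PySem.Dict.mk id_to_seq) a 999999) else b) (f a0) =
          (rest.map f).foldl (fun m x => if x.2 < m.2 then x else m) (f a0) := by
        rw [List.foldl_map]
      have hmax : rest.foldl (fun b a =>
            if b.2 ≤ PySem.Dict.getD (PySem.Dict.mk id_to_seq) a 999999
            then (a, PySem.Dict.getD (PySem.Dict.mk id_to_seq) a 999999) else b) (f a0) =
          (rest.map f).foldl (fun m x => if x.2 < m.2 then m else x) (f a0) := by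
        rw [List.foldl_map]
        congr 1
        funext b a
        exact pvFlip b (f a)
      have hh := pvSorted_head (f a0) (rest.map f)
      rw [← hmap, ← hsp] at hh
      obtain ⟨t, ht⟩ := List.head?_eq_some_iff.mp hh
      have hhead : PySem.List.pyGetD sp 0 ("", 0) =
          (rest.map f).foldl (fun m x => if x.2 < m.2 then x else m) (f a0) := by
        rw [ht, PySem.List.pyGetD_zero_cons]
      have hl := pvSorted_last (f a0) (rest.map f)
      rw [← hmap, ← hsp] at hl
      have hne : sp ≠ [] := by rw [ht]; simp
      have hlast : PySem.List.pyGetD sp (-1) ("", 0) =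
          (rest.map f).foldl (fun m x => if x.2 < m.2 then m else x) (f a0) := by
        rw [PySem.List.pyGetD_neg_one sp ("", 0) hne]
        rw [List.getLast?_eq_some_getLast hne] at hl
        exact Option.some.inj hl
      by_cases htop : pos = "top"
      · rw [if_pos htop, hhead, htop,
           if_neg (by decide : ¬("top" : String) = "middle"),
           if_neg (by decide : ¬("top" : String) = "bottom"),
           show (a0, PySem.Dict.getD (PySem.Dict.mk id_to_seq) a0 999999) = f a0 from rfl, hmin]
      · rw [if_neg htop]
        by_cases hbot : pos = "bottom"
        · rw [if_pos hbot, hlast, hbot,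
             if_neg (by decide : ¬("bottom" : String) = "middle"),
             if_pos (rfl : ("bottom" : String) = "bottom")]
          simp only [ge_iff_le]
          rw [show (a0, PySem.Dict.getD (PySem.Dict.mk id_to_seq) a0 999999) = f a0 from rfl, hmax]
        · rw [if_neg hbot]
          by_cases hmid : pos = "middle"
          · simp [hmid]
          · rw [if_neg hmid, if_neg hmid, if_neg hbot, hhead,
               show (a0, PySem.Dict.getD (PySem.Dict.mk id_to_seq) a0 999999) = f a0 from rfl, hmin]
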